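-- pv_equiv track=rewrite | github.com/CHENyiru3/CodeBTI | scripts/validate_repo.py | field_block
-- ===== SOURCE A (Python) =====
-- REQUIRED_QUESTION_FIELDS = (
--     "Question ID:",
--     "Scope:",
--     "Dimension:",
--     "User-facing scenario:",
--     "User-facing instruction:",
--     "Code example:",
--     "Choices:",
--     "Agent scoring:",
--     "Pattern signals:",
--     "CodeStyle output implications:",
-- )
--
-- def field_block(section: str, field: str) -> str:
--     field_index = section.find(field)
--     if field_index == -1:
--         return ""
--     start = field_index + len(field)
--     next_indexes = [
--         section.find(next_field, start)
--         for next_field in REQUIRED_QUESTION_FIELDS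
--         if next_field != field and section.find(next_field, start) != -1
--     ]
--     end = min(next_indexes) if next_indexes else len(section)
--     return section[start:end].strip()
-- ===== SOURCE B (Python) =====
-- REQUIRED_QUESTION_FIELDS = (
--     "Question ID:",
--     "Scope:",
--     "Dimension:",
--     "User-facing scenario:",
--     "User-facing instruction:",
--     "Code example:",
--     "Choices:",
--     "Agent scoring:",
--     "Pattern signals:",
--     "CodeStyle output implications:",
-- )
--
-- def field_block(section: str, field: str) -> str:
--     i = section.find(field)
--     if i == -1:
--         return ""
--     start = i + len(field)
--     # index of every (position, label) occurrence of a required-field label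
--     occurrences = [(j, f)
--                    for j in range(len(section))
--                    for f in REQUIRED_QUESTION_FIELDS
--                    if section.startswith(f, j)]
--     boundaries = [j for j, f in occurrences if j >= start and f != field]
--     end = min(boundaries, default=len(section))
--     return section[start:end].strip()
-- ===== Notes on version B (the rewrite author's own statement) =====
-- stated objective: alternative
-- what changed: A runs a separate find-from-start scan per required-field label and takes the min of the ten hit positions; B first builds one index of all (position, label) occurrences of required labels in the section, then filters it to boundaries at/after the content start with a different label and takes the minimum position.
import Mathlib
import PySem

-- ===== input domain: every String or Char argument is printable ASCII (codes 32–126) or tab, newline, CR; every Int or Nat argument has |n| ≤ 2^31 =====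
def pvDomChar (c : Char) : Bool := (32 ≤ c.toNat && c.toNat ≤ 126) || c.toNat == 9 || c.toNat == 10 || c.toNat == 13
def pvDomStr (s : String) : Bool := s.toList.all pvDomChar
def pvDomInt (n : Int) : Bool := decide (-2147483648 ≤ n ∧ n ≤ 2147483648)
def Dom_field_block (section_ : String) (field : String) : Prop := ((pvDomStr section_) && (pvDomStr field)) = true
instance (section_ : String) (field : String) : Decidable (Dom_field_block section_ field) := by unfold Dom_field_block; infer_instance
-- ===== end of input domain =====

-- B replaces A's ten separate find-from-start scans (+ min of the hits) by first building one
-- index of all (position, label) occurrences of required labels, then filtering and taking the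
-- minimum position (objective: alternative decomposition, same cost).

def REQUIRED_QUESTION_FIELDS : List String :=
  ["Question ID:", "Scope:", "Dimension:", "User-facing scenario:",
   "User-facing instruction:", "Code example:", "Choices:", "Agent scoring:",
   "Pattern signals:", "CodeStyle output implications:"]

-- ===== PORT A =====
-- the list comprehension of A: find each other field from `start`, keeping the hits
def pvNexts (section_ : String) (field : String) (start : Int) : List Int :=
  REQUIRED_QUESTION_FIELDS.filterMap (fun nf =>
    if nf ≠ field ∧ PySem.Str.findFrom section_ nf start ≠ -1
    then some (PySem.Str.findFrom section_ nf start) else none)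

def field_block (section_ : String) (field : String) : String :=
  let fieldIndex := PySem.Str.find section_ field
  if fieldIndex = -1 then ""
  else
    let start := fieldIndex + PySem.Str.len field
    let nextIndexes := pvNexts section_ field start
    -- min(next_indexes) if next_indexes else len(section)
    let end_ := (PySem.List.min? nextIndexes (fun x => x)).getD (PySem.Str.len section_)
    PySem.Str.strip (PySem.Str.slice section_ (some start) (some end_))

-- ===== PORT B =====
-- Source B's occurrence index: [(j, f) for j in range(len(section)) for f in FIELDS if section.startswith(f, j)];
-- section.startswith(f, j) ported as prefix test on toList.drop j.toNat — exact since 0 ≤ j < len(section)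
def pvOccurrences (section_ : String) : List (Int × String) :=
  (PySem.List.pyRange 0 (PySem.Str.len section_)).flatMap (fun j =>
    REQUIRED_QUESTION_FIELDS.filterMap (fun f =>
      if PySem.Chars.startswith (section_.toList.drop j.toNat) f.toList
      then some (j, f) else none))

def field_block_alt (section_ : String) (field : String) : String :=
  let i := PySem.Str.find section_ field
  if i = -1 then ""
  else
    let start := i + PySem.Str.len field
    -- boundaries = [j for j, f in occurrences if j >= start and f != field]
    let boundaries := (pvOccurrences section_).filterMap (fun jf =>
      if start ≤ jf.1 ∧ jf.2 ≠ field then some jf.1 else none)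
    -- min(boundaries, default=len(section))
    let end_ := (PySem.List.min? boundaries (fun x => x)).getD (PySem.Str.len section_)
    PySem.Str.strip (PySem.Str.slice section_ (some start) (some end_))

-- ===== PRECONDITION & SPEC =====
def Spec_field_block (section_ : String) (field : String) (out : String) : Prop := out = field_block_alt section_ field
instance (section_ : String) (field : String) (out : String) : Decidable (Spec_field_block section_ field out) := by unfold Spec_field_block; infer_instance

-- ===== CLAIM (what is proved, stated in full; the proofs are below) =====
def Claim_equal_field_block : Prop := ∀ (section_ : String) (field : String), Dom_field_block section_ field → Spec_field_block section_ field (field_block section_ field)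

-- ===== LEMMAS AND PROOFS =====

theorem RQF_toList_ne_nil : ∀ nf ∈ REQUIRED_QUESTION_FIELDS, nf.toList ≠ [] := by
  decide

theorem prefix_drop_infix {s sub : List Char} {k j : Nat} (hkj : k ≤ j)
    (h : sub <+: s.drop j) : sub <:+: s.drop k := by
  have hdd : s.drop j = (s.drop k).drop (j - k) := by
    rw [List.drop_drop]; congr 1; omega
  rw [hdd] at h
  exact h.isInfix.trans (List.drop_suffix _ _).isInfix

-- min? picks a minimum: if m is a member below every member, min? returns m
theorem min?_eq_of_mem_of_le {xs : List Int} {m : Int} (hm : m ∈ xs)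
    (hle : ∀ x ∈ xs, m ≤ x) : PySem.List.min? xs (fun x => x) = some m := by
  cases h : PySem.List.min? xs (fun x => x) with
  | none => exact absurd ((PySem.List.min?_eq_none_iff xs _).mp h ▸ hm) (by simp)
  | some m' =>
    have h1 : m' ∈ xs := PySem.List.min?_mem h
    have h2 : m' ≤ m := PySem.List.min?_isMin h m hm
    have h3 : m ≤ m' := hle m' h1
    rw [le_antisymm h2 h3]

-- membership in B's boundary list, unfolded to a closed condition on the position
theorem mem_boundaries {section_ field : String} {start x : Int} :
    x ∈ (pvOccurrences section_).filterMap (fun jf =>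
          if start ≤ jf.1 ∧ jf.2 ≠ field then some jf.1 else none) ↔
    ∃ f ∈ REQUIRED_QUESTION_FIELDS, f ≠ field ∧ start ≤ x ∧ 0 ≤ x ∧
      x < PySem.Str.len section_ ∧ f.toList <+: section_.toList.drop x.toNat := by
  constructor
  · intro hx
    rw [List.mem_filterMap] at hx
    obtain ⟨⟨j, f⟩, hmem, hif⟩ := hx
    by_cases hc : start ≤ j ∧ f ≠ field
    · rw [if_pos hc] at hif
      obtain rfl : j = x := Option.some.inj hif
      unfold pvOccurrences at hmem
      rw [List.mem_flatMap] at hmem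
      obtain ⟨j', hj', hjf⟩ := hmem
      rw [List.mem_filterMap] at hjf
      obtain ⟨f', hf', hif'⟩ := hjf
      by_cases hsw : PySem.Chars.startswith (section_.toList.drop j'.toNat) f'.toList = true
      · rw [if_pos hsw] at hif'
        have hinj := Option.some.inj hif'
        have hj'x : j' = j := congrArg Prod.fst hinj
        have hf'f : f' = f := congrArg Prod.snd hinj
        subst hj'x; subst hf'f
        rw [PySem.List.mem_pyRange_one] at hj'
        exact ⟨f', hf', hc.2, hc.1, hj'.1, hj'.2, (PySem.Chars.startswith_iff _ _).mp hsw⟩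
      · rw [if_neg hsw] at hif'; cases hif'
    · rw [if_neg hc] at hif; cases hif
  · rintro ⟨f, hf, hne, hsx, h0, hxl, hpre⟩
    rw [List.mem_filterMap]
    refine ⟨(x, f), ?_, by rw [if_pos ⟨hsx, hne⟩]⟩
    unfold pvOccurrences
    rw [List.mem_flatMap]
    refine ⟨x, PySem.List.mem_pyRange_one.mpr ⟨h0, hxl⟩, ?_⟩
    rw [List.mem_filterMap]
    exact ⟨f, hf, by rw [if_pos ((PySem.Chars.startswith_iff _ _).mpr hpre)]⟩

-- every hit of A's per-field finds is a boundary of B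
theorem nexts_subset_boundaries {section_ field : String} {k : Nat}
    (hk : k ≤ section_.toList.length) {x : Int}
    (hx : x ∈ pvNexts section_ field (k : Int)) :
    x ∈ (pvOccurrences section_).filterMap (fun jf =>
          if (k : Int) ≤ jf.1 ∧ jf.2 ≠ field then some jf.1 else none) := by
  unfold pvNexts at hx
  rw [List.mem_filterMap] at hx
  obtain ⟨nf, hnf, heq⟩ := hx
  by_cases hc : nf ≠ field ∧ PySem.Str.findFrom section_ nf (k : Int) ≠ -1
  · rw [if_pos hc] at heq
    obtain rfl : PySem.Str.findFrom section_ nf (k : Int) = x := Option.some.inj heq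
    have hc2 := hc.2
    rw [PySem.Str.findFrom_eq] at hc2 ⊢
    obtain ⟨hge, hpre, -⟩ := PySem.Chars.findFrom_natCast_spec section_.toList nf.toList k hk hc2
    set r := PySem.Chars.findFrom section_.toList nf.toList (k : Int) with hr
    have hdne : section_.toList.drop r.toNat ≠ [] := by
      intro he; exact RQF_toList_ne_nil nf hnf (List.prefix_nil.mp (he ▸ hpre))
    have hrl : r.toNat < section_.toList.length := by
      by_contra hge2
      exact hdne (List.drop_eq_nil_of_le (by omega))
    rw [mem_boundaries]
    refine ⟨nf, hnf, hc.1, hge, by omega, ?_, hpre⟩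
    rw [PySem.Str.len_eq]; omega
  · rw [if_neg hc] at heq; cases heq
-- every boundary of B is at or after one of A's hits
theorem boundaries_covered {section_ field : String} {k : Nat}
    (hk : k ≤ section_.toList.length) {x : Int}
    (hx : x ∈ (pvOccurrences section_).filterMap (fun jf =>
          if (k : Int) ≤ jf.1 ∧ jf.2 ≠ field then some jf.1 else none)) :
    ∃ y ∈ pvNexts section_ field (k : Int), y ≤ x := by
  rw [mem_boundaries] at hx
  obtain ⟨f, hf, hne, hkx, h0, hxl, hpre⟩ := hx
  have hxk : x = ((x.toNat : Nat) : Int) := by omega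
  have hfind : PySem.Str.findFrom section_ f (k : Int) ≠ -1 := by
    rw [PySem.Str.findFrom_eq, ne_eq,
      PySem.Chars.findFrom_natCast_eq_neg_one_iff section_.toList f.toList k hk]
    push Not
    exact prefix_drop_infix (by omega : k ≤ x.toNat) hpre
  refine ⟨PySem.Str.findFrom section_ f (k : Int), ?_, ?_⟩
  · unfold pvNexts
    rw [List.mem_filterMap]
    exact ⟨f, hf, by rw [if_pos ⟨hne, hfind⟩]⟩
  · rw [PySem.Str.findFrom_eq] at hfind ⊢
    obtain ⟨hge, -, hmin⟩ := PySem.Chars.findFrom_natCast_spec section_.toList f.toList k hk hfind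
    set r := PySem.Chars.findFrom section_.toList f.toList (k : Int) with hr
    have : ¬ x.toNat < r.toNat := fun hlt => hmin x.toNat (by omega) hlt hpre
    omega

-- core: A's min-of-finds equals B's min over the filtered occurrence index
theorem endEq (section_ field : String) (k : Nat) (hk : k ≤ section_.toList.length) :
    (PySem.List.min? (pvNexts section_ field (k : Int)) (fun x => x)).getD (PySem.Str.len section_) =
    (PySem.List.min? ((pvOccurrences section_).filterMap (fun jf =>
        if (k : Int) ≤ jf.1 ∧ jf.2 ≠ field then some jf.1 else none)) (fun x => x)).getD
      (PySem.Str.len section_) := by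
  cases hA : PySem.List.min? (pvNexts section_ field (k : Int)) (fun x => x) with
  | none =>
    have hAe := (PySem.List.min?_eq_none_iff _ _).mp hA
    have hBe : (pvOccurrences section_).filterMap (fun jf =>
        if (k : Int) ≤ jf.1 ∧ jf.2 ≠ field then some jf.1 else none) = [] := by
      rw [List.eq_nil_iff_forall_not_mem]
      intro x hx
      obtain ⟨y, hy, -⟩ := boundaries_covered hk hx
      rw [hAe] at hy; cases hy
    rw [hBe, (PySem.List.min?_eq_none_iff ([] : List Int) _).mpr rfl]
  | some m =>
    have hmB : m ∈ (pvOccurrences section_).filterMap (fun jf =>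
        if (k : Int) ≤ jf.1 ∧ jf.2 ≠ field then some jf.1 else none) :=
      nexts_subset_boundaries hk (PySem.List.min?_mem hA)
    have hle : ∀ x ∈ (pvOccurrences section_).filterMap (fun jf =>
        if (k : Int) ≤ jf.1 ∧ jf.2 ≠ field then some jf.1 else none), m ≤ x := by
      intro x hx
      obtain ⟨y, hy, hyx⟩ := boundaries_covered hk hx
      exact le_trans (PySem.List.min?_isMin hA y hy) hyx
    rw [min?_eq_of_mem_of_le hmB hle]

-- ===== VERDICT (by name: the statement is the Claim_ definition above) =====
theorem field_block_spec : Claim_equal_field_block := by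
  intro section_ field _
  show field_block section_ field = field_block_alt section_ field
  simp only [field_block, field_block_alt]
  by_cases h : PySem.Str.find section_ field = -1
  · rw [if_pos h, if_pos h]
  · rw [if_neg h, if_neg h]
    have h0 : 0 ≤ PySem.Str.find section_ field := by
      have := PySem.Chars.neg_one_le_find section_.toList field.toList
      rw [← PySem.Str.find_eq] at this
      omega
    have hnn : 0 ≤ PySem.Chars.find section_.toList field.toList := by
      rw [← PySem.Str.find_eq]; exact h0
    have hsp : field.toList <+: section_.toList.drop (PySem.Str.find section_ field).toNat := by
      have := (PySem.Chars.find_spec hnn).1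
      rw [← PySem.Str.find_eq] at this
      exact this
    have hlen : (PySem.Str.find section_ field).toNat + field.toList.length ≤ section_.toList.length := by
      have h1 := hsp.length_le
      rw [List.length_drop] at h1
      have h2 : PySem.Str.find section_ field ≤ (section_.toList.length : Int) := by
        rw [PySem.Str.find_eq]; exact PySem.Chars.find_le_length _ _
      omega
    have hstart : PySem.Str.find section_ field + PySem.Str.len field
        = (((PySem.Str.find section_ field).toNat + field.toList.length : Nat) : Int) := by
      rw [PySem.Str.len_eq]; push_cast; omega
    rw [hstart, endEq section_ field _ (by omega)]
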